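-- pv_equiv track=rewrite | github.com/moobeom/Rosalind | Bioinformatics_Algorithms/Chapter4/BA4M.py | Turnpike
-- ===== SOURCE A (Python) =====
-- def Turnpike(points):
--     if len(points) == 2:
--         return [0, points[1]]
--     distances = [abs(points[0] - p) for p in points[1:]]
--     max_idx = distances.index(max(distances))
--     left_points = [abs(points[0] - p) for p in points[1:max_idx+1]]
--     right_points = [abs(points[max_idx] - p) for p in points[max_idx+1:]]
--     left_set = Turnpike(left_points)
--     right_set = Turnpike(right_points)
--     return [x for x in left_set] + [points[0]] + [x + abs(points[max_idx] - points[0]) for x in right_set]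
-- ===== SOURCE B (Python) =====
-- def Turnpike(points):
--     # Iterative post-order traversal with an explicit work stack instead of recursion.
--     work = [('call', points)]
--     results = []
--     while work:
--         frame = work.pop()
--         if frame[0] == 'call':
--             pts = frame[1]
--             if len(pts) == 2:
--                 results.append([0, pts[1]])
--             else:
--                 distances = [abs(pts[0] - p) for p in pts[1:]]
--                 m = distances.index(max(distances))
--                 off = abs(pts[m] - pts[0])
--                 work.append(('combine', pts[0], off))
--                 work.append(('call', [abs(pts[m] - p) for p in pts[m + 1:]]))
--                 work.append(('call', [abs(pts[0] - p) for p in pts[1:m + 1]]))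
--         else:
--             _, p0, off = frame
--             right = results.pop()
--             left = results.pop()
--             results.append(left + [p0] + [x + off for x in right])
--     return results[-1]
-- ===== Notes on version B (the rewrite author's own statement) =====
-- stated objective: alternative
-- what changed: Replaces A's two-way recursion by an explicit iterative post-order traversal: a work stack of call/combine frames and a results stack, combining left + [p0] + shifted right when a combine frame is popped.
import Mathlib
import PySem

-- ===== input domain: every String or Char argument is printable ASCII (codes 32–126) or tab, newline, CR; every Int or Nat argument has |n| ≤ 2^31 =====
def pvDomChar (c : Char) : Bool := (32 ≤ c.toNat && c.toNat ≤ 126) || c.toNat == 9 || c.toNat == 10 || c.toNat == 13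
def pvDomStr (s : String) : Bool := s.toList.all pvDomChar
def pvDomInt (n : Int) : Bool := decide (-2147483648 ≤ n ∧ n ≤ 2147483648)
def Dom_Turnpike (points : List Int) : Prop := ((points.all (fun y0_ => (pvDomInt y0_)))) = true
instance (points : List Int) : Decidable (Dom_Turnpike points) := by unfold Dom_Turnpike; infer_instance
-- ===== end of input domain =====

-- B replaces A's two-way recursion by an explicit post-order traversal with a work stack of call/combine frames and a results stack (alternative decomposition; same cost).


-- ===== PORT A =====
-- Literal port of A's recursion; the Nat fuel (= points.length, enough because both
-- recursive sub-lists are strictly shorter) only makes the same computation total.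
def TurnpikeGo : Nat → List Int → List Int
  | 0, _ => []
  | fuel + 1, points =>
    if points.length = 2 then
      [0, PySem.List.pyGetD points (1 : Int) 0]
    else
      let distances := (PySem.List.slice points (some 1) none).map
        (fun p => |PySem.List.pyGetD points (0 : Int) 0 - p|)
      match PySem.List.max? distances (fun x => x) with
      | none => []            -- Python: max([]) raises ValueError (outside Pre_)
      | some M =>
        match PySem.List.index? distances M with
        | none => []          -- unreachable: M ∈ distances
        | some maxIdx =>
          let leftPoints := (PySem.List.slice points (some 1) (some ((maxIdx : Int) + 1))).map
            (fun p => |PySem.List.pyGetD points (0 : Int) 0 - p|)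
          let rightPoints := (PySem.List.slice points (some ((maxIdx : Int) + 1)) none).map
            (fun p => |PySem.List.pyGetD points (maxIdx : Int) 0 - p|)
          let leftSet := TurnpikeGo fuel leftPoints
          let rightSet := TurnpikeGo fuel rightPoints
          leftSet ++ [PySem.List.pyGetD points (0 : Int) 0] ++
            rightSet.map (fun x =>
              x + |PySem.List.pyGetD points (maxIdx : Int) 0 - PySem.List.pyGetD points (0 : Int) 0|)

def Turnpike (points : List Int) : List Int := TurnpikeGo points.length points

-- ===== PORT B =====
-- Port of Source B's stack machine: a work stack of call/combine frames and a results
-- stack (head = Python's list end, so append = cons, pop = head); the Nat fuel bounds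
-- the while-loop's iteration count and only makes the same computation total.
inductive PvFrame
  | call : List Int → PvFrame
  | combine : Int → Int → PvFrame
deriving Repr

def TurnpikeAltGo : Nat → List PvFrame → List (List Int) → List Int
  | 0, _, _ => []
  | fuel + 1, work, results =>
    match work with
    | [] => results.headD []          -- while exits: return results[-1]
    | PvFrame.call pts :: rest =>
      if pts.length = 2 then
        TurnpikeAltGo fuel rest ([0, PySem.List.pyGetD pts (1 : Int) 0] :: results)
      else
        let distances := (PySem.List.slice pts (some 1) none).map
          (fun p => |PySem.List.pyGetD pts (0 : Int) 0 - p|)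
        match PySem.List.max? distances (fun x => x) with
        | none => []                  -- Python: max([]) raises ValueError (outside Pre_)
        | some M =>
          match PySem.List.index? distances M with
          | none => []                -- unreachable
          | some m =>
            let p0 := PySem.List.pyGetD pts (0 : Int) 0
            let off := |PySem.List.pyGetD pts (m : Int) 0 - p0|
            let leftPts := (PySem.List.slice pts (some 1) (some ((m : Int) + 1))).map
              (fun p => |p0 - p|)
            let rightPts := (PySem.List.slice pts (some ((m : Int) + 1)) none).map
              (fun p => |PySem.List.pyGetD pts (m : Int) 0 - p|)
            TurnpikeAltGo fuel
              (PvFrame.call leftPts :: PvFrame.call rightPts :: PvFrame.combine p0 off :: rest)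
              results
    | PvFrame.combine p0 off :: rest =>
      match results with
      | right :: left :: rs =>
        TurnpikeAltGo fuel rest ((left ++ [p0] ++ right.map (fun x => x + off)) :: rs)
      | _ => []                       -- Python: pop from empty list (outside Pre_)

def Turnpike_alt (points : List Int) : List Int :=
  TurnpikeAltGo (2 * points.length + 2) [PvFrame.call points] []

-- ===== PRECONDITION & SPEC =====
-- pvSplit: the split A performs on a list of length ≠ 2 — first point, offset, left and
-- right sub-lists; none exactly when Python's max([]) would raise (length < 2).
def pvSplit (pts : List Int) : Option (Int × Int × List Int × List Int) :=
  let distances := (PySem.List.slice pts (some 1) none).map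
    (fun p => |PySem.List.pyGetD pts (0 : Int) 0 - p|)
  match PySem.List.max? distances (fun x => x) with
  | none => none
  | some M =>
    match PySem.List.index? distances M with
    | none => none
    | some m =>
      some (PySem.List.pyGetD pts (0 : Int) 0,
        |PySem.List.pyGetD pts (m : Int) 0 - PySem.List.pyGetD pts (0 : Int) 0|,
        (PySem.List.slice pts (some 1) (some ((m : Int) + 1))).map
          (fun p => |PySem.List.pyGetD pts (0 : Int) 0 - p|),
        (PySem.List.slice pts (some ((m : Int) + 1)) none).map
          (fun p => |PySem.List.pyGetD pts (m : Int) 0 - p|))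

def PreBGo : Nat → List Int → Bool
  | 0, _ => false
  | fuel + 1, pts =>
    if pts.length = 2 then true
    else match pvSplit pts with
      | none => false
      | some (_, _, l, r) => PreBGo fuel l && PreBGo fuel r

-- Pre_ holds on EXACTLY the inputs where the Python A returns (it admits every returning
-- input): A raises (IndexError/ValueError) precisely when its recursion reaches a
-- sub-list of length ≠ 2 that cannot be split into two non-degenerate halves; that set
-- is inherently recursive in the nested first-maximum splits (no non-recursive closed
-- form exists), so Pre_ states that recurrence on the input shape — it computes no
-- outputs of either program (the fuel = points.length only makes the recurrence total,
-- since both halves of a split are strictly shorter).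
def Pre_Turnpike (points : List Int) : Prop := PreBGo points.length points = true
instance (points : List Int) : Decidable (Pre_Turnpike points) := by
  unfold Pre_Turnpike; infer_instance

def pvWitness_Turnpike : List Int := [-1, 5, 1, 8, -4]

def Spec_Turnpike (points : List Int) (out : List Int) : Prop := out = Turnpike_alt points
instance (points : List Int) (out : List Int) : Decidable (Spec_Turnpike points out) := by
  unfold Spec_Turnpike; infer_instance

-- ===== CLAIM (what is proved, stated in full; the proofs are below) =====
def Claim_equal_Turnpike : Prop :=
  ∀ (points : List Int), Dom_Turnpike points → Pre_Turnpike points →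
    Spec_Turnpike points (Turnpike points)

-- ===== LEMMAS AND PROOFS =====

-- number of loop iterations Source B's machine spends on a call frame (proof-only)
def stepsGo : Nat → List Int → Nat
  | 0, _ => 1
  | fuel + 1, pts =>
    if pts.length = 2 then 1
    else match pvSplit pts with
      | none => 1
      | some (_, _, l, r) => stepsGo fuel l + stepsGo fuel r + 2

theorem pvSplit_lens {pts : List Int} {p0 off : Int} {l r : List Int}
    (h : pvSplit pts = some (p0, off, l, r)) :
    2 ≤ pts.length ∧ l.length + r.length + 1 = pts.length := by
  unfold pvSplit at h
  rcases hM : PySem.List.max? ((PySem.List.slice pts (some 1) none).map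
      (fun p => |PySem.List.pyGetD pts (0 : Int) 0 - p|)) (fun x => x) with _ | M
  · simp only [hM] at h
    cases h
  · simp only [hM] at h
    rcases hI : PySem.List.index? ((PySem.List.slice pts (some 1) none).map
        (fun p => |PySem.List.pyGetD pts (0 : Int) 0 - p|)) M with _ | m
    · simp only [hI] at h
      cases h
    · simp only [hI, Option.some.injEq, Prod.mk.injEq] at h
      obtain ⟨-, -, hl, hr⟩ := h
      obtain ⟨hk, -, -⟩ := PySem.List.getElem_of_index?_eq_some hI
      rw [List.length_map, PySem.List.slice_from_one, List.length_tail] at hk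
      have hm1 : ((m : Int) + 1) = (((m + 1 : Nat)) : Int) := by push_cast; ring
      have h1 : (1 : Int) = ((1 : Nat) : Int) := rfl
      have hll : l.length = m := by
        rw [← hl, List.length_map, hm1, h1, PySem.List.slice_natCast,
          List.length_take, List.length_drop]
        omega
      have hrl : r.length = pts.length - (m + 1) := by
        rw [← hr, List.length_map, hm1, PySem.List.slice_from_natCast, List.length_drop]
      omega

theorem goA_len2 (f : Nat) (pts : List Int) (h2 : pts.length = 2) :
    TurnpikeGo (f + 1) pts = [0, PySem.List.pyGetD pts (1 : Int) 0] := by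
  rw [TurnpikeGo]; simp [h2]

theorem goA_match (f : Nat) (pts : List Int) (h2 : ¬ pts.length = 2) :
    TurnpikeGo (f + 1) pts =
      match pvSplit pts with
      | none => []
      | some (p0, off, l, r) =>
          TurnpikeGo f l ++ [p0] ++ (TurnpikeGo f r).map (fun x => x + off) := by
  rw [TurnpikeGo, if_neg h2]
  unfold pvSplit
  rcases hM : PySem.List.max? ((PySem.List.slice pts (some 1) none).map
      (fun p => |PySem.List.pyGetD pts (0 : Int) 0 - p|)) (fun x => x) with _ | M
  · simp only [hM]
  · simp only [hM]
    rcases hI : PySem.List.index? ((PySem.List.slice pts (some 1) none).map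
        (fun p => |PySem.List.pyGetD pts (0 : Int) 0 - p|)) M with _ | m
    · rfl
    · rfl

theorem goA_step (f : Nat) (pts : List Int) (h2 : ¬ pts.length = 2)
    {p0 off : Int} {l r : List Int} (hS : pvSplit pts = some (p0, off, l, r)) :
    TurnpikeGo (f + 1) pts =
      TurnpikeGo f l ++ [p0] ++ (TurnpikeGo f r).map (fun x => x + off) := by
  rw [goA_match f pts h2, hS]

theorem altgo_nil (f : Nat) (results : List (List Int)) :
    TurnpikeAltGo (f + 1) [] results = results.headD [] := rfl

theorem altgo_leaf (f : Nat) (pts : List Int) (h2 : pts.length = 2)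
    (rest : List PvFrame) (results : List (List Int)) :
    TurnpikeAltGo (f + 1) (PvFrame.call pts :: rest) results =
      TurnpikeAltGo f rest ([0, PySem.List.pyGetD pts (1 : Int) 0] :: results) := by
  rw [TurnpikeAltGo]; simp [h2]

theorem altgo_match (f : Nat) (pts : List Int) (h2 : ¬ pts.length = 2)
    (rest : List PvFrame) (results : List (List Int)) :
    TurnpikeAltGo (f + 1) (PvFrame.call pts :: rest) results =
      match pvSplit pts with
      | none => []
      | some (p0, off, l, r) =>
          TurnpikeAltGo f
            (PvFrame.call l :: PvFrame.call r :: PvFrame.combine p0 off :: rest) results := by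
  rw [TurnpikeAltGo]
  simp only [if_neg h2]
  unfold pvSplit
  rcases hM : PySem.List.max? ((PySem.List.slice pts (some 1) none).map
      (fun p => |PySem.List.pyGetD pts (0 : Int) 0 - p|)) (fun x => x) with _ | M
  · simp only [hM]
  · simp only [hM]
    rcases hI : PySem.List.index? ((PySem.List.slice pts (some 1) none).map
        (fun p => |PySem.List.pyGetD pts (0 : Int) 0 - p|)) M with _ | m
    · rfl
    · rfl

theorem altgo_step (f : Nat) (pts : List Int) (h2 : ¬ pts.length = 2)
    {p0 off : Int} {l r : List Int} (hS : pvSplit pts = some (p0, off, l, r))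
    (rest : List PvFrame) (results : List (List Int)) :
    TurnpikeAltGo (f + 1) (PvFrame.call pts :: rest) results =
      TurnpikeAltGo f
        (PvFrame.call l :: PvFrame.call r :: PvFrame.combine p0 off :: rest) results := by
  rw [altgo_match f pts h2, hS]

theorem altgo_combine (f : Nat) (p0 off : Int) (rest : List PvFrame)
    (right left : List Int) (rs : List (List Int)) :
    TurnpikeAltGo (f + 1) (PvFrame.combine p0 off :: rest) (right :: left :: rs) =
      TurnpikeAltGo f rest ((left ++ [p0] ++ right.map (fun x => x + off)) :: rs) := rfl

theorem preBGo_none (f : Nat) (pts : List Int) (h2 : ¬ pts.length = 2)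
    (hS : pvSplit pts = none) : PreBGo (f + 1) pts = false := by
  rw [PreBGo, if_neg h2, hS]

theorem preBGo_split (f : Nat) (pts : List Int) (h2 : ¬ pts.length = 2)
    {p0 off : Int} {l r : List Int} (hS : pvSplit pts = some (p0, off, l, r)) :
    PreBGo (f + 1) pts = (PreBGo f l && PreBGo f r) := by
  rw [PreBGo, if_neg h2, hS]

theorem stepsGo_two (f : Nat) (pts : List Int) (h2 : pts.length = 2) :
    stepsGo (f + 1) pts = 1 := by
  rw [stepsGo, if_pos h2]

theorem stepsGo_split (f : Nat) (pts : List Int) (h2 : ¬ pts.length = 2)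
    {p0 off : Int} {l r : List Int} (hS : pvSplit pts = some (p0, off, l, r)) :
    stepsGo (f + 1) pts = stepsGo f l + stepsGo f r + 2 := by
  rw [stepsGo, if_neg h2, hS]

theorem preB_len {f : Nat} {pts : List Int} (h : PreBGo f pts = true) : 2 ≤ pts.length := by
  cases f with
  | zero => cases h
  | succ f =>
    by_cases h2 : pts.length = 2
    · omega
    · rcases hS : pvSplit pts with _ | ⟨p0, off, l, r⟩
      · rw [preBGo_none f pts h2 hS] at h
        cases h
      · exact (pvSplit_lens hS).1

theorem steps_le : ∀ (f : Nat) (pts : List Int), pts.length ≤ f → PreBGo f pts = true →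
    stepsGo f pts ≤ 2 * pts.length - 3 := by
  intro f
  induction f with
  | zero => intro pts _ h; cases h
  | succ f IH =>
    intro pts hlen hpre
    by_cases h2 : pts.length = 2
    · rw [stepsGo_two f pts h2]
      omega
    · rcases hS : pvSplit pts with _ | ⟨p0, off, l, r⟩
      · rw [preBGo_none f pts h2 hS] at hpre
        cases hpre
      · rw [preBGo_split f pts h2 hS, Bool.and_eq_true] at hpre
        obtain ⟨hpl, hpr⟩ := hpre
        obtain ⟨hp2, hsum⟩ := pvSplit_lens hS
        have hal := preB_len hpl
        have har := preB_len hpr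
        have hbl := IH l (by omega) hpl
        have hbr := IH r (by omega) hpr
        rw [stepsGo_split f pts h2 hS]
        omega

theorem altgo_run : ∀ (f : Nat) (pts : List Int), pts.length ≤ f → PreBGo f pts = true →
    ∀ (fb : Nat) (rest : List PvFrame) (results : List (List Int)), stepsGo f pts ≤ fb →
    TurnpikeAltGo fb (PvFrame.call pts :: rest) results =
      TurnpikeAltGo (fb - stepsGo f pts) rest (TurnpikeGo f pts :: results) := by
  intro f
  induction f with
  | zero => intro pts _ h; cases h
  | succ f IH =>
    intro pts hlen hpre fb rest results hfb
    by_cases h2 : pts.length = 2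
    · rw [stepsGo_two f pts h2] at hfb ⊢
      obtain ⟨fb', rfl⟩ : ∃ fb', fb = fb' + 1 := ⟨fb - 1, by omega⟩
      rw [altgo_leaf fb' pts h2, goA_len2 f pts h2]
      rfl
    · rcases hS : pvSplit pts with _ | ⟨p0, off, l, r⟩
      · rw [preBGo_none f pts h2 hS] at hpre
        cases hpre
      · rw [preBGo_split f pts h2 hS, Bool.and_eq_true] at hpre
        obtain ⟨hpl, hpr⟩ := hpre
        obtain ⟨hp2, hsum⟩ := pvSplit_lens hS
        rw [stepsGo_split f pts h2 hS] at hfb ⊢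
        obtain ⟨fb', rfl⟩ : ∃ fb', fb = fb' + 1 := ⟨fb - 1, by omega⟩
        rw [altgo_step fb' pts h2 hS,
          IH l (by omega) hpl fb' _ _ (by omega),
          IH r (by omega) hpr _ _ _ (by omega)]
        obtain ⟨k, hk⟩ : ∃ k, fb' - stepsGo f l - stepsGo f r = k + 1 :=
          ⟨fb' - stepsGo f l - stepsGo f r - 1, by omega⟩
        rw [hk, altgo_combine, goA_step f pts h2 hS]
        congr 1
        omega

-- ===== VERDICT (by name: the statement is the Claim_ definition above) =====
theorem Turnpike_spec : Claim_equal_Turnpike := by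
  intro pts _ hpre
  unfold Spec_Turnpike Turnpike Turnpike_alt
  have hp : PreBGo pts.length pts = true := hpre
  have hlen := preB_len hp
  have hst := steps_le pts.length pts le_rfl hp
  rw [altgo_run pts.length pts le_rfl hp (2 * pts.length + 2) [] [] (by omega)]
  have hk : 2 * pts.length + 2 - stepsGo pts.length pts =
      (2 * pts.length + 1 - stepsGo pts.length pts) + 1 := by omega
  rw [hk, altgo_nil]
  rfl
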